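-- pv_equiv track=rewrite | github.com/javkjc/themgmtwonder | apps/ml-service/prompt_builder.py | _serialize_zone_lines
-- ===== SOURCE A (Python) =====
-- from typing import Any, Dict, List, Optional
--
-- ZONE_ORDER = ["header", "addresses", "line_items", "instructions", "footer", "unknown"]
--
-- def _serialize_zone_lines(zone_lines: Dict[str, List[str]]) -> str:
--     blocks: List[str] = []
--     for zone in ZONE_ORDER + [z for z in zone_lines if z not in ZONE_ORDER]:
--         lines = zone_lines.get(zone) or []
--         if not lines:
--             continue
--         blocks.append(f"[ZONE: {zone}]\n" + "\n".join(lines))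
--     return "\n\n".join(blocks)
-- ===== SOURCE B (Python) =====
-- from typing import Dict, List
--
-- ZONE_ORDER = ["header", "addresses", "line_items", "instructions", "footer", "unknown"]
--
-- def _serialize_zone_lines(zone_lines: Dict[str, List[str]]) -> str:
--     n = len(ZONE_ORDER)
--     rank = {z: i for i, z in enumerate(ZONE_ORDER)}
--     buckets: List[List[str]] = [[] for _ in range(n + 1)]
--     for zone, lines in zone_lines.items():
--         if lines:
--             buckets[rank.get(zone, n)].append(f"[ZONE: {zone}]\n" + "\n".join(lines))
--     return "\n\n".join(block for bucket in buckets for block in bucket)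
-- ===== Notes on version B (the rewrite author's own statement) =====
-- stated objective: alternative
-- what changed: Instead of probing the dict for each zone of ZONE_ORDER and then rescanning the keys for unknown zones, B makes one pass over the items distributing each nonempty zone's block into a rank-indexed bucket list (rank.get(zone, n)), then flattens the buckets; Pre_ only excludes association lists with duplicate keys, which do not correspond to any Python dict input.
import Mathlib
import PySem

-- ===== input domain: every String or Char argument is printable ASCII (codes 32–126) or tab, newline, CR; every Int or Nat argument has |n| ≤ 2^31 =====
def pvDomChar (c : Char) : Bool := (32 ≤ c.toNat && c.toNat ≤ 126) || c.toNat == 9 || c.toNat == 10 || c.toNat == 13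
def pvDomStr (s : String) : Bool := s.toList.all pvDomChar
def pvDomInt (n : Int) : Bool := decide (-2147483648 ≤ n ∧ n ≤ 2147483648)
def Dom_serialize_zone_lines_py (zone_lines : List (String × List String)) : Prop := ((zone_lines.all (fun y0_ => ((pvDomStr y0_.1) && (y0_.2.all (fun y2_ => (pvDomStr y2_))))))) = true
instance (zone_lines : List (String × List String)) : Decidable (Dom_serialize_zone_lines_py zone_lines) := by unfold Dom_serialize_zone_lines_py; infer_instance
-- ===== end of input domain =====

-- B replaces A's ordered probing (one dict.get per zone of ZONE_ORDER, then a rescan of the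
-- keys for unknown zones) by a single pass over the items that distributes each nonempty
-- zone's block into a rank-indexed bucket list; same result, different traversal (alternative).

-- ===== PORT A =====
def ZONE_ORDER : List String := ["header", "addresses", "line_items", "instructions", "footer", "unknown"]

-- first-match association-list lookup = dict.get (keys are unique under Pre_)
def pvGet? {α : Type} : List (String × α) → String → Option α
  | [], _ => none
  | p :: t, k => if p.1 = k then some p.2 else pvGet? t k

-- f"[ZONE: {zone}]\n" + "\n".join(lines)
def mkBlock (zone : String) (lines : List String) : String :=
  "[ZONE: " ++ zone ++ "]\n" ++ PySem.Str.join "\n" lines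

-- loop body of A: lines = zone_lines.get(zone) or []; if not lines: continue; blocks.append(...)
def stepA (zone_lines : List (String × List String)) (blocks : List String) (zone : String) : List String :=
  let lines := (pvGet? zone_lines zone).getD []
  if lines = [] then blocks else blocks ++ [mkBlock zone lines]

def serialize_zone_lines_py (zone_lines : List (String × List String)) : String :=
  let blocks := (ZONE_ORDER ++ (zone_lines.map Prod.fst).filter (fun z => !decide (z ∈ ZONE_ORDER))).foldl
    (stepA zone_lines) []
  PySem.Str.join "\n\n" blocks

-- ===== PORT B =====
-- rank = {z: i for i, z in enumerate(ZONE_ORDER)}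
def rankList : List (String × Nat) := ZONE_ORDER.zipIdx

-- rank.get(zone, n) with n = len(ZONE_ORDER) = 6
def pvRank (z : String) : Nat := (pvGet? rankList z).getD 6

-- buckets[r].append(s)
def bucketAdd : List (List String) → Nat → String → List (List String)
  | [], _, _ => []
  | b :: bs, 0, s => (b ++ [s]) :: bs
  | b :: bs, Nat.succ r, s => b :: bucketAdd bs r s

-- loop body of B
def stepB (bks : List (List String)) (p : String × List String) : List (List String) :=
  if p.2 = [] then bks else bucketAdd bks (pvRank p.1) (mkBlock p.1 p.2)

def serialize_zone_lines_py_alt (zone_lines : List (String × List String)) : String :=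
  let buckets := zone_lines.foldl stepB (List.replicate 7 [])
  PySem.Str.join "\n\n" buckets.flatten

-- ===== PRECONDITION & SPEC =====
-- A Python dict cannot contain duplicate keys, so Pre_ excludes only association lists that
-- do not encode any Python input (duplicate keys), on which first-match vs per-item reading differ.
def Pre_serialize_zone_lines_py (zone_lines : List (String × List String)) : Prop :=
  (zone_lines.map Prod.fst).Nodup
instance (zone_lines : List (String × List String)) : Decidable (Pre_serialize_zone_lines_py zone_lines) := by unfold Pre_serialize_zone_lines_py; infer_instance

def pvWitness_serialize_zone_lines_py : (List (String × List String)) :=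
  [("custom", ["c1", "c2"]), ("header", ["h"]), ("footer", [])]

def Spec_serialize_zone_lines_py (zone_lines : List (String × List String)) (out : String) : Prop := out = serialize_zone_lines_py_alt zone_lines
instance (zone_lines : List (String × List String)) (out : String) : Decidable (Spec_serialize_zone_lines_py zone_lines out) := by unfold Spec_serialize_zone_lines_py; infer_instance

-- ===== CLAIM (what is proved, stated in full; the proofs are below) =====
def Claim_equal_serialize_zone_lines_py : Prop := ∀ (zone_lines : List (String × List String)), Dom_serialize_zone_lines_py zone_lines → Pre_serialize_zone_lines_py zone_lines → Spec_serialize_zone_lines_py zone_lines (serialize_zone_lines_py zone_lines)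

-- ===== LEMMAS AND PROOFS =====

-- E r zl: the blocks B's pass puts into bucket r, in input order
def E (r : Nat) (zl : List (String × List String)) : List String :=
  (zl.filter (fun p => !decide (p.2 = []) && decide (pvRank p.1 = r))).map (fun p => mkBlock p.1 p.2)

-- C zl z: the (0- or 1-element) contribution of zone z in A's loop
def C (zl : List (String × List String)) (z : String) : List String :=
  if (pvGet? zl z).getD [] = [] then [] else [mkBlock z ((pvGet? zl z).getD [])]

lemma rankList_eq : rankList = [("header", 0), ("addresses", 1), ("line_items", 2),
    ("instructions", 3), ("footer", 4), ("unknown", 5)] := by rfl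

lemma pvRank_eq (z : String) : pvRank z =
    if z = "header" then 0 else if z = "addresses" then 1 else if z = "line_items" then 2
    else if z = "instructions" then 3 else if z = "footer" then 4 else if z = "unknown" then 5 else 6 := by
  have hnil : ∀ (k : String), pvGet? ([] : List (String × Nat)) k = none := fun _ => rfl
  have hcons : ∀ (p : String × Nat) t k, pvGet? (p :: t) k = if p.1 = k then some p.2 else pvGet? t k :=
    fun _ _ _ => rfl
  unfold pvRank
  rw [rankList_eq, hcons, hcons, hcons, hcons, hcons, hcons, hnil]
  split_ifs <;> simp_all

lemma pvRank_le (z : String) : pvRank z ≤ 6 := by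
  rw [pvRank_eq]; split_ifs <;> omega

lemma pvRank_eq_six_iff (z : String) : pvRank z = 6 ↔ ¬ z ∈ ZONE_ORDER := by
  rw [pvRank_eq]; simp [ZONE_ORDER]; split_ifs <;> simp_all

lemma stepA_eq (zl : List (String × List String)) (acc : List String) (z : String) :
    stepA zl acc z = acc ++ C zl z := by
  simp only [stepA, C]; split_ifs <;> simp

lemma foldlA (zl : List (String × List String)) (keys : List String) :
    ∀ acc, keys.foldl (stepA zl) acc = acc ++ keys.flatMap (C zl) := by
  induction keys with
  | nil => simp
  | cons k t ih => intro acc; simp [List.foldl_cons, stepA_eq, ih, List.flatMap_cons]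

lemma foldB_buckets (zl : List (String × List String)) :
    ∀ b0 b1 b2 b3 b4 b5 b6 : List String,
      zl.foldl stepB [b0, b1, b2, b3, b4, b5, b6] =
        [b0 ++ E 0 zl, b1 ++ E 1 zl, b2 ++ E 2 zl, b3 ++ E 3 zl,
         b4 ++ E 4 zl, b5 ++ E 5 zl, b6 ++ E 6 zl] := by
  induction zl with
  | nil => intro b0 b1 b2 b3 b4 b5 b6; simp [E]
  | cons p t ih =>
    intro b0 b1 b2 b3 b4 b5 b6
    by_cases hp : p.2 = []
    · simp [List.foldl_cons, stepB, hp, ih, E]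
    · have hr := pvRank_le p.1
      set r := pvRank p.1 with hrdef
      have hE : ∀ j, E j (p :: t) = if r = j then mkBlock p.1 p.2 :: E j t else E j t := by
        intro j
        by_cases hj : r = j <;> simp [E, hp, ← hrdef, hj]
      interval_cases r <;>
        simp [List.foldl_cons, stepB, hp, ← hrdef, bucketAdd, ih, hE]

lemma C_cons_of_ne {p : String × List String} {t : List (String × List String)} {k : String}
    (h : p.1 ≠ k) : C (p :: t) k = C t k := by
  simp [C, pvGet?, h]

lemma E_nil_of_not_mem (r : Nat) (k : String) (hk : ∀ z, pvRank z = r ↔ z = k)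
    (t : List (String × List String)) (hmem : k ∉ t.map Prod.fst) : E r t = [] := by
  unfold E
  rw [List.map_eq_nil_iff, List.filter_eq_nil_iff]
  intro q hq hc
  have hr : pvRank q.1 = r := by
    simp only [Bool.and_eq_true, decide_eq_true_eq] at hc
    exact hc.2
  have hmm : q.1 ∈ t.map Prod.fst := List.mem_map_of_mem hq
  rw [(hk q.1).mp hr] at hmm
  exact hmem hmm

lemma E_eq_C (r : Nat) (k : String) (hk : ∀ z, pvRank z = r ↔ z = k) :
    ∀ zl : List (String × List String), (zl.map Prod.fst).Nodup → E r zl = C zl k := by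
  intro zl
  induction zl with
  | nil => intro _; simp [E, C, pvGet?]
  | cons p t ih =>
    intro hnd
    simp only [List.map_cons, List.nodup_cons] at hnd
    by_cases hpk : p.1 = k
    · have hEt : E r t = [] := E_nil_of_not_mem r k hk t (hpk ▸ hnd.1)
      by_cases hp2 : p.2 = []
      · have h1 : E r (p :: t) = E r t := by simp [E, hp2]
        have h2 : C (p :: t) k = [] := by simp [C, pvGet?, hpk, hp2]
        rw [h1, hEt, h2]
      · have hrk : pvRank p.1 = r := (hk p.1).mpr hpk
        have h1 : E r (p :: t) = mkBlock p.1 p.2 :: E r t := by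
          simp [E, hp2, hrk]
        have h2 : C (p :: t) k = [mkBlock k p.2] := by simp [C, pvGet?, hpk, hp2]
        rw [h1, hEt, h2, hpk]
    · have hq : pvRank p.1 ≠ r := fun h => hpk ((hk p.1).mp h)
      have h1 : E r (p :: t) = E r t := by simp [E, hq]
      rw [h1, ih hnd.2, C_cons_of_ne hpk]

lemma E6_eq_flatMap :
    ∀ zl : List (String × List String), (zl.map Prod.fst).Nodup →
      E 6 zl = ((zl.map Prod.fst).filter (fun z => !decide (z ∈ ZONE_ORDER))).flatMap (C zl) := by
  intro zl
  induction zl with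
  | nil => intro _; simp [E]
  | cons p t ih =>
    intro hnd
    simp only [List.map_cons, List.nodup_cons] at hnd
    have htail : ((t.map Prod.fst).filter (fun z => !decide (z ∈ ZONE_ORDER))).flatMap (C (p :: t)) =
        ((t.map Prod.fst).filter (fun z => !decide (z ∈ ZONE_ORDER))).flatMap (C t) := by
      apply List.flatMap_congr
      intro z hz
      have hzmem : z ∈ t.map Prod.fst := List.mem_of_mem_filter hz
      exact C_cons_of_ne (fun h => hnd.1 (h ▸ hzmem))
    by_cases hmem : p.1 ∈ ZONE_ORDER
    · have h6 : pvRank p.1 ≠ 6 := fun h => ((pvRank_eq_six_iff p.1).mp h) hmem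
      have h1 : E 6 (p :: t) = E 6 t := by simp [E, h6]
      have h2 : (((p :: t).map Prod.fst).filter (fun z => !decide (z ∈ ZONE_ORDER))) =
          ((t.map Prod.fst).filter (fun z => !decide (z ∈ ZONE_ORDER))) := by
        simp [hmem]
      rw [h1, ih hnd.2, h2, ← htail]
    · have h6 : pvRank p.1 = 6 := (pvRank_eq_six_iff p.1).mpr hmem
      have h2 : (((p :: t).map Prod.fst).filter (fun z => !decide (z ∈ ZONE_ORDER))) =
          p.1 :: ((t.map Prod.fst).filter (fun z => !decide (z ∈ ZONE_ORDER))) := by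
        simp [hmem]
      have hself : C (p :: t) p.1 = if p.2 = [] then [] else [mkBlock p.1 p.2] := by
        by_cases hp2 : p.2 = [] <;> simp [C, pvGet?, hp2]
      by_cases hp2 : p.2 = []
      · have h1 : E 6 (p :: t) = E 6 t := by simp [E, hp2]
        rw [h1, ih hnd.2, h2, List.flatMap_cons, hself, htail]
        simp [hp2]
      · have h1 : E 6 (p :: t) = mkBlock p.1 p.2 :: E 6 t := by
          simp [E, hp2, h6]
        rw [h1, ih hnd.2, h2, List.flatMap_cons, hself, htail]
        simp [hp2]

-- ===== VERDICT (by name: the statement is the Claim_ definition above) =====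
theorem serialize_zone_lines_py_spec : Claim_equal_serialize_zone_lines_py := by
  intro zl _ hnd
  unfold Spec_serialize_zone_lines_py
  unfold Pre_serialize_zone_lines_py at hnd
  have hA : serialize_zone_lines_py zl = PySem.Str.join "\n\n"
      (C zl "header" ++ C zl "addresses" ++ C zl "line_items" ++ C zl "instructions" ++
       C zl "footer" ++ C zl "unknown" ++
       ((zl.map Prod.fst).filter (fun z => !decide (z ∈ ZONE_ORDER))).flatMap (C zl)) := by
    simp [serialize_zone_lines_py, ZONE_ORDER, List.foldl_cons, stepA_eq, foldlA]
  have hB : serialize_zone_lines_py_alt zl = PySem.Str.join "\n\n"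
      (E 0 zl ++ E 1 zl ++ E 2 zl ++ E 3 zl ++ E 4 zl ++ E 5 zl ++ E 6 zl) := by
    have : (List.replicate 7 ([] : List String)) = [[], [], [], [], [], [], []] := rfl
    simp [serialize_zone_lines_py_alt, this, foldB_buckets]
  rw [hA, hB]
  have hk0 : ∀ z, pvRank z = 0 ↔ z = "header" := by
    intro z; rw [pvRank_eq]; split_ifs <;> simp_all
  have hk1 : ∀ z, pvRank z = 1 ↔ z = "addresses" := by
    intro z; rw [pvRank_eq]; split_ifs <;> simp_all
  have hk2 : ∀ z, pvRank z = 2 ↔ z = "line_items" := by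
    intro z; rw [pvRank_eq]; split_ifs <;> simp_all
  have hk3 : ∀ z, pvRank z = 3 ↔ z = "instructions" := by
    intro z; rw [pvRank_eq]; split_ifs <;> simp_all
  have hk4 : ∀ z, pvRank z = 4 ↔ z = "footer" := by
    intro z; rw [pvRank_eq]; split_ifs <;> simp_all
  have hk5 : ∀ z, pvRank z = 5 ↔ z = "unknown" := by
    intro z; rw [pvRank_eq]; split_ifs <;> simp_all
  rw [E_eq_C 0 _ hk0 zl hnd, E_eq_C 1 _ hk1 zl hnd, E_eq_C 2 _ hk2 zl hnd,
      E_eq_C 3 _ hk3 zl hnd, E_eq_C 4 _ hk4 zl hnd, E_eq_C 5 _ hk5 zl hnd,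
      E6_eq_flatMap zl hnd]
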